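-- pv_equiv track=rewrite | github.com/ChiuYeeJay/Reharmonizer_web | ref/harmonizer.py | considering_8th_note
-- ===== SOURCE A (Python) =====
-- def considering_8th_note(note_list: list, index: int, cur: list):
--     result = []
--     cur.append(note_list[index])
--     if index == 4:
--         result.append(cur.copy())
--     else:
--         result.extend(considering_8th_note(note_list, index+1, cur))
--
--     cur.pop()
--     cur.append(note_list[index]+12)
--     if index == 4:
--         temp = cur.copy()
--         temp.sort()
--         if temp[0] == note_list[0] or temp[0] == note_list[0]+12:
--             result.append(temp)
--     else:
--         result.extend(considering_8th_note(note_list, index+1, cur))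
--     cur.pop()
--     return result
-- ===== SOURCE B (Python) =====
-- def considering_8th_note(note_list: list, index: int, cur: list):
--     # Build all octave-shift prefixes layer by layer (breadth-first product),
--     # then handle the two index-4 leaf variants in one final pass.
--     bases = [list(cur)]
--     for p in range(index, 4):
--         bases = [b + [note_list[p] + off] for b in bases for off in (0, 12)]
--     n4 = note_list[4]
--     root = note_list[0]
--     result = []
--     for base in bases:
--         result.append(base + [n4])
--         temp = sorted(base + [n4 + 12])
--         if temp[0] == root or temp[0] == root + 12:
--             result.append(temp)
--     return result
-- ===== Notes on version B (the rewrite author's own statement) =====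
-- stated objective: simpler
-- what changed: Replaces A's depth-first recursion that mutates a shared cur list with an iterative layer-by-layer construction of all octave-shift prefixes (a breadth-first binary product) followed by a single pass that emits the two index-4 leaf variants per prefix.
import Mathlib
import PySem

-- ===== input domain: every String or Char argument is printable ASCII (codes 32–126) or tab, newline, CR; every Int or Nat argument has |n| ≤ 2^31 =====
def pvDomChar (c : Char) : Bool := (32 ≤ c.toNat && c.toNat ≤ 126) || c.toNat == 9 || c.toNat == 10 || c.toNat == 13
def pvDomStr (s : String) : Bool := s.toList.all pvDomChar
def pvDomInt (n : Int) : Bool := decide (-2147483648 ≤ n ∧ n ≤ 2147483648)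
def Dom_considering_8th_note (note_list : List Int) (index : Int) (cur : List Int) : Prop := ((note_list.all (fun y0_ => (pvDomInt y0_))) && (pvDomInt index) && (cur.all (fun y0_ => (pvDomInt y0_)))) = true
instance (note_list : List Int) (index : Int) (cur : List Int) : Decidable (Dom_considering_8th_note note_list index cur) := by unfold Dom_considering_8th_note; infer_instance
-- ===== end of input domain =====

-- B replaces A's mutating depth-first recursion by an iterative layer-by-layer product of
-- octave choices followed by one leaf pass (objective: simpler). A mutates `cur` only
-- transiently (append/pop pairs), leaving it unchanged on return, so return-value
-- equivalence is the whole story.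

-- ===== PORT A =====
-- A recurses index → index+1 until index == 4; fuel (5-index).toNat counts those steps
-- exactly (for index > 4 Python diverges; such inputs are outside Pre_).
-- note_list[i] is pyGetD with default 0: Python raises IndexError out of range; Pre_ excludes that.
def considering_8th_note_go (note_list : List Int) (fuel : Nat) (index : Int) (cur : List Int) : List (List Int) :=
  match fuel with
  | 0 => []
  | fuel + 1 =>
    let v := PySem.List.pyGetD note_list index 0
    let r1 : List (List Int) :=
      if index = 4 then [cur ++ [v]]
      else considering_8th_note_go note_list fuel (index + 1) (cur ++ [v])
    let r2 : List (List Int) :=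
      if index = 4 then
        let temp := PySem.List.sorted (cur ++ [v + 12]) id false
        if PySem.List.pyGetD temp 0 0 = PySem.List.pyGetD note_list 0 0 ∨
           PySem.List.pyGetD temp 0 0 = PySem.List.pyGetD note_list 0 0 + 12 then [temp] else []
      else considering_8th_note_go note_list fuel (index + 1) (cur ++ [v + 12])
    r1 ++ r2

def considering_8th_note (note_list : List Int) (index : Int) (cur : List Int) : List (List Int) :=
  considering_8th_note_go note_list (5 - index).toNat index cur

-- ===== PORT B =====
def considering_8th_note_alt (note_list : List Int) (index : Int) (cur : List Int) : List (List Int) :=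
  let bases := (PySem.List.pyRange index 4 1).foldl
    (fun bases p => bases.flatMap
      (fun b => [(0 : Int), 12].map (fun off => b ++ [PySem.List.pyGetD note_list p 0 + off]))) [cur]
  let n4 := PySem.List.pyGetD note_list 4 0
  let root := PySem.List.pyGetD note_list 0 0
  bases.foldl (fun result base =>
    let r := result ++ [base ++ [n4]]
    let temp := PySem.List.sorted (base ++ [n4 + 12]) id false
    if PySem.List.pyGetD temp 0 0 = root ∨ PySem.List.pyGetD temp 0 0 = root + 12 then
      r ++ [temp] else r) []

-- ===== PRECONDITION & SPEC =====
-- Pre_ is exactly A's return domain: for index > 4 A recurses without a base case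
-- (RecursionError), for index < -len(note_list) note_list[index] raises IndexError,
-- and for len(note_list) < 5 the leaf's note_list[4] raises IndexError.
def Pre_considering_8th_note (note_list : List Int) (index : Int) (cur : List Int) : Prop :=
  5 ≤ note_list.length ∧ -(note_list.length : Int) ≤ index ∧ index ≤ 4
instance (note_list : List Int) (index : Int) (cur : List Int) : Decidable (Pre_considering_8th_note note_list index cur) := by unfold Pre_considering_8th_note; infer_instance
def pvWitness_considering_8th_note : List Int × Int × List Int := ([1, 2, 3, 4, 5], 2, [9])

def Spec_considering_8th_note (note_list : List Int) (index : Int) (cur : List Int) (out : List (List Int)) : Prop := out = considering_8th_note_alt note_list index cur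
instance (note_list : List Int) (index : Int) (cur : List Int) (out : List (List Int)) : Decidable (Spec_considering_8th_note note_list index cur out) := by unfold Spec_considering_8th_note; infer_instance

-- ===== CLAIM (what is proved, stated in full; the proofs are below) =====
def Claim_equal_considering_8th_note : Prop := ∀ (note_list : List Int) (index : Int) (cur : List Int), Dom_considering_8th_note note_list index cur → Pre_considering_8th_note note_list index cur → Spec_considering_8th_note note_list index cur (considering_8th_note note_list index cur)

-- ===== LEMMAS AND PROOFS =====

-- the two leaf rows contributed by a finished prefix `base`
def pvLeaf (note_list : List Int) (base : List Int) : List (List Int) :=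
  let n4 := PySem.List.pyGetD note_list 4 0
  let root := PySem.List.pyGetD note_list 0 0
  let temp := PySem.List.sorted (base ++ [n4 + 12]) id false
  (base ++ [n4]) ::
    (if PySem.List.pyGetD temp 0 0 = root ∨ PySem.List.pyGetD temp 0 0 = root + 12 then [temp] else [])

-- all extensions of `b` by octave choices over positions ps, in A's (and B's) order
def pvExt (note_list : List Int) (ps : List Int) (b : List Int) : List (List Int) :=
  match ps with
  | [] => [b]
  | p :: ps =>
      pvExt note_list ps (b ++ [PySem.List.pyGetD note_list p 0]) ++
      pvExt note_list ps (b ++ [PySem.List.pyGetD note_list p 0 + 12])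

theorem pvLeaf_foldl (note_list : List Int) (bases : List (List Int)) (acc : List (List Int)) :
    bases.foldl (fun result base =>
      let r := result ++ [base ++ [PySem.List.pyGetD note_list 4 0]]
      let temp := PySem.List.sorted (base ++ [PySem.List.pyGetD note_list 4 0 + 12]) id false
      if PySem.List.pyGetD temp 0 0 = PySem.List.pyGetD note_list 0 0 ∨
         PySem.List.pyGetD temp 0 0 = PySem.List.pyGetD note_list 0 0 + 12 then
        r ++ [temp] else r) acc
    = acc ++ bases.flatMap (pvLeaf note_list) := by
  induction bases generalizing acc with
  | nil => simp
  | cons b bs ih =>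
      simp only [List.foldl_cons, List.flatMap_cons, ih]
      unfold pvLeaf
      split <;> simp [*]

theorem pvExt_foldl (note_list : List Int) (ps : List Int) (bases : List (List Int)) :
    ps.foldl (fun bases p => bases.flatMap
      (fun b => [(0 : Int), 12].map (fun off => b ++ [PySem.List.pyGetD note_list p 0 + off]))) bases
    = bases.flatMap (pvExt note_list ps) := by
  induction ps generalizing bases with
  | nil => simp [pvExt]
  | cons p ps ih =>
      rw [List.foldl_cons, ih, List.flatMap_assoc]
      congr 1
      funext b
      simp [pvExt]

theorem pvGo_eq (note_list : List Int) (k : Nat) (cur : List Int) :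
    considering_8th_note_go note_list (k + 1) (4 - (k : Int)) cur
    = (pvExt note_list (PySem.List.pyRange (4 - (k : Int)) 4 1) cur).flatMap (pvLeaf note_list) := by
  induction k generalizing cur with
  | zero =>
      simp [considering_8th_note_go, PySem.List.pyRange_one_eq_nil, pvExt, pvLeaf]
  | succ k ih =>
      have hc : ((k + 1 : Nat) : Int) = (k : Int) + 1 := by push_cast; ring
      rw [hc]
      have hlt : (4 : Int) - ((k : Int) + 1) < 4 := by omega
      rw [PySem.List.pyRange_one_cons hlt]
      have hne : ¬ ((4 : Int) - ((k : Int) + 1) = 4) := by omega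
      have hstep : (4 : Int) - ((k : Int) + 1) + 1 = 4 - (k : Int) := by ring
      unfold considering_8th_note_go
      simp only [if_neg hne, hstep, ih, pvExt, List.flatMap_append]

-- ===== VERDICT (by name: the statement is the Claim_ definition above) =====
theorem considering_8th_note_spec : Claim_equal_considering_8th_note := by
  intro note_list index cur _hd hpre
  obtain ⟨-, -, h4⟩ := hpre
  unfold Spec_considering_8th_note
  simp only [considering_8th_note, considering_8th_note_alt]
  obtain ⟨k, hk⟩ : ∃ k : Nat, index = 4 - (k : Int) := ⟨(4 - index).toNat, by omega⟩
  subst hk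
  have hf : (5 - (4 - (k : Int))).toNat = k + 1 := by omega
  rw [hf, pvExt_foldl, pvLeaf_foldl, pvGo_eq]
  simp
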